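-- pv_equiv track=rewrite | github.com/glm1024/babel | src/zh_audit/po_rst_protection.py | _structural_slots
-- ===== SOURCE A (Python) =====
-- def _structural_slots(slots):
--     structural = []
--     raw_slots = list(slots or [])
--     for index, slot in enumerate(raw_slots):
--         if slot.get("type") == "text":
--             continue
--         item = dict(slot)
--         item["previous_text"] = _adjacent_text_slot(raw_slots, index, -1)
--         item["next_text"] = _adjacent_text_slot(raw_slots, index, 1)
--         structural.append(item)
--     return structural
--
-- def _adjacent_text_slot(slots, index, direction):
--     current = int(index) + int(direction)
--     while 0 <= current < len(slots):
--         slot = slots[current]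
--         if slot.get("type") == "text":
--             return str(slot.get("source_text", "") or "")
--         if slot.get("type") is not None:
--             return ""
--         current += int(direction)
--     return ""
-- ===== SOURCE B (Python) =====
-- def _structural_slots(slots):
--     raw = list(slots or [])
--
--     def _scan(seq):
--         # out[i] = nearest adjacent text already seen, reset on typed non-text slots
--         out = []
--         cur = ""
--         for slot in seq:
--             out.append(cur)
--             t = slot.get("type")
--             if t == "text":
--                 cur = str(slot.get("source_text", "") or "")
--             elif t is not None:
--                 cur = ""
--         return out
--
--     prev = _scan(raw)
--     nxt = _scan(reversed(raw))
--     nxt.reverse()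
--
--     structural = []
--     for slot, before, after in zip(raw, prev, nxt):
--         if slot.get("type") == "text":
--             continue
--         item = dict(slot)
--         item["previous_text"] = before
--         item["next_text"] = after
--         structural.append(item)
--     return structural
-- ===== Notes on version B (the rewrite author's own statement) =====
-- stated objective: faster
-- what changed: Replaces the per-slot bidirectional rescans of the whole list with two linear passes that precompute the nearest preceding/following text for every position (resetting on typed non-text slots), then a single zip pass builds the output.
import Mathlib
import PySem

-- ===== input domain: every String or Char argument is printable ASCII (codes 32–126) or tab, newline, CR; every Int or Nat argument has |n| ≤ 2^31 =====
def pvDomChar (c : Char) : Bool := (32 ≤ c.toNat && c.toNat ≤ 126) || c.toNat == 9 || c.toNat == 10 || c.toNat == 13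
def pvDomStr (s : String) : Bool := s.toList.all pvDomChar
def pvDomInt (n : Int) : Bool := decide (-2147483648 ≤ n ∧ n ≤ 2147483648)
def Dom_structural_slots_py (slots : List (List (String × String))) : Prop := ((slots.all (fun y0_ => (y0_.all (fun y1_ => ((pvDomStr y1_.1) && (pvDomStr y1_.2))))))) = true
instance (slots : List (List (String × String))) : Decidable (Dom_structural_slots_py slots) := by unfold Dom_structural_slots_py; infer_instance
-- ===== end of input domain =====

-- ===== PORT A =====
-- B precomputes each slot's nearest adjacent text in two linear passes instead of A's per-slot rescans; return value proved equal (objective: faster).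
-- shared accessors for the Python dict lookups both programs perform on a slot
def pvType (slot : List (String × String)) : Option String :=
  (PySem.Dict.ofList slot).get? "type"

def pvSource (slot : List (String × String)) : String :=
  (PySem.Dict.ofList slot).getD "source_text" ""

-- item = dict(slot); item["previous_text"] = p; item["next_text"] = n  (shared literal lines of both programs)
def pvItem (slot : List (String × String)) (p n : String) : List (String × String) :=
  (((PySem.Dict.ofList slot).insert "previous_text" p).insert "next_text" n).items

-- the while-loop of _adjacent_text_slot; fuel (slots.length + 1) only totalizes the loop:
-- each iteration needs 0 <= current < len, positions move monotonically, so it never runs out while Python would still loop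
def pvAdjGo (slots : List (List (String × String))) (current direction : Int) : Nat → String
  | 0 => ""
  | fuel + 1 =>
    if 0 ≤ current ∧ current < (slots.length : Int) then
      let slot := slots.getD current.toNat []
      if pvType slot = some "text" then pvSource slot
      else if (pvType slot).isSome then ""
      else pvAdjGo slots (current + direction) direction fuel
    else ""

def adjacentTextSlot (slots : List (List (String × String))) (index direction : Int) : String :=
  pvAdjGo slots (index + direction) direction (slots.length + 1)

def structural_slots_py (slots : List (List (String × String))) : List (List (String × String)) :=
  (PySem.List.enumerate slots).foldl
    (fun structural p =>
      if pvType p.2 = some "text" then structural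
      else structural ++ [pvItem p.2 (adjacentTextSlot slots p.1 (-1)) (adjacentTextSlot slots p.1 1)])
    []

-- ===== PORT B =====
-- one step of the linear pass: the nearest text carried so far, updated by the current slot
def pvScanStep (cur : String) (slot : List (String × String)) : String :=
  if pvType slot = some "text" then pvSource slot
  else if (pvType slot).isSome then "" else cur

-- _scan: out[i] = carried value BEFORE processing seq[i]
def pvScan (seq : List (List (String × String))) : List String :=
  (seq.foldl (fun st slot => (st.1 ++ [st.2], pvScanStep st.2 slot)) (([] : List String), "")).1

def structural_slots_py_alt (slots : List (List (String × String))) : List (List (String × String)) :=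
  let prev := pvScan slots
  let nxt := (pvScan slots.reverse).reverse
  (slots.zip (prev.zip nxt)).foldl
    (fun structural p =>
      if pvType p.1 = some "text" then structural
      else structural ++ [pvItem p.1 p.2.1 p.2.2])
    []

-- ===== PRECONDITION & SPEC =====
def Spec_structural_slots_py (slots : List (List (String × String))) (out : List (List (String × String))) : Prop := out = structural_slots_py_alt slots
instance (slots : List (List (String × String))) (out : List (List (String × String))) : Decidable (Spec_structural_slots_py slots out) := by unfold Spec_structural_slots_py; infer_instance

-- ===== CLAIM (what is proved, stated in full; the proofs are below) =====
def Claim_equal_structural_slots_py : Prop := ∀ (slots : List (List (String × String))), Dom_structural_slots_py slots → Spec_structural_slots_py slots (structural_slots_py slots)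

-- ===== LEMMAS AND PROOFS =====
-- reference scan: first decisive slot left-to-right, falling back to `cur`
def pvG (cur : String) : List (List (String × String)) → String
  | [] => cur
  | y :: t => if pvType y = some "text" then pvSource y
              else if (pvType y).isSome then "" else pvG cur t

-- cons-form of pvScan's fold
def pvScanAux (cur : String) : List (List (String × String)) → List String
  | [] => []
  | x :: t => cur :: pvScanAux (pvScanStep cur x) t

lemma pvG_append (x : List (String × String)) :
    ∀ (l : List (List (String × String))) (cur : String),
      pvG cur (l ++ [x]) = pvG (pvScanStep cur x) l := by
  intro l
  induction l with
  | nil => intro cur; simp [pvG, pvScanStep]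
  | cons y t ih =>
    intro cur
    simp only [List.cons_append, pvG]
    split_ifs <;> simp [ih]

lemma pvFold_fst (l : List (List (String × String))) :
    ∀ (acc : List String) (cur : String),
      (l.foldl (fun st slot => (st.1 ++ [st.2], pvScanStep st.2 slot)) (acc, cur)).1
        = acc ++ pvScanAux cur l := by
  induction l with
  | nil => intro acc cur; simp [pvScanAux]
  | cons x t ih =>
    intro acc cur
    simp only [List.foldl_cons, pvScanAux]
    rw [ih]
    simp

lemma pvScanAux_length (l : List (List (String × String))) :
    ∀ cur, (pvScanAux cur l).length = l.length := by
  induction l with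
  | nil => intro cur; rfl
  | cons x t ih => intro cur; simp [pvScanAux, ih]

lemma pvScanAux_getElem (l : List (List (String × String))) :
    ∀ (cur : String) (i : Nat) (h : i < l.length),
      (pvScanAux cur l)[i]'(by rw [pvScanAux_length]; exact h)
        = pvG cur ((l.take i).reverse) := by
  induction l with
  | nil => intro cur i h; simp at h
  | cons x t ih =>
    intro cur i h
    cases i with
    | zero => simp [pvScanAux, pvG]
    | succ i =>
      have h' : i < t.length := by simpa using h
      simp only [pvScanAux, List.getElem_cons_succ]
      rw [ih (pvScanStep cur x) i h', List.take_succ_cons, List.reverse_cons, pvG_append]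

lemma pvScan_eq (l : List (List (String × String))) : pvScan l = pvScanAux "" l := by
  unfold pvScan
  rw [pvFold_fst]
  simp

lemma pvAdj_left (slots : List (List (String × String))) :
    ∀ (i : Nat) (fuel : Nat), i ≤ slots.length → i < fuel →
      pvAdjGo slots ((i : Int) - 1) (-1) fuel = pvG "" ((slots.take i).reverse) := by
  intro i
  induction i with
  | zero =>
    intro fuel _ hf
    cases fuel with
    | zero => omega
    | succ f =>
      rw [pvAdjGo, if_neg (by omega)]
      simp [pvG]
  | succ i ih =>
    intro fuel hle hf
    cases fuel with
    | zero => omega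
    | succ f =>
      have hi : i < slots.length := by omega
      have hcur : ((i + 1 : Nat) : Int) - 1 = (i : Int) := by omega
      rw [hcur, pvAdjGo, if_pos (by constructor <;> [omega; exact_mod_cast hi])]
      have htk : (slots.take (i + 1)).reverse = slots[i] :: (slots.take i).reverse := by
        rw [List.take_add_one, List.getElem?_eq_getElem hi]
        simp
      rw [htk]
      simp only [Int.toNat_natCast, List.getD_eq_getElem slots [] hi, pvG]
      split_ifs with h1 h2
      · rfl
      · rfl
      · have harg : (i : Int) + -1 = ((i : Int) - 1) := by ring
        rw [harg, ih f (by omega) (by omega)]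

lemma pvAdj_right (slots : List (List (String × String))) :
    ∀ (fuel : Nat) (j : Nat), slots.length - j < fuel →
      pvAdjGo slots (j : Int) 1 fuel = pvG "" (slots.drop j) := by
  intro fuel
  induction fuel with
  | zero => intro j h; omega
  | succ f ih =>
    intro j h
    by_cases hj : j < slots.length
    · rw [pvAdjGo, if_pos (by constructor <;> [omega; exact_mod_cast hj])]
      rw [List.drop_eq_getElem_cons hj]
      simp only [Int.toNat_natCast, List.getD_eq_getElem slots [] hj, pvG]
      split_ifs with h1 h2
      · rfl
      · rfl
      · have harg : (j : Int) + 1 = ((j + 1 : Nat) : Int) := by omega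
        rw [harg, ih (j + 1) (by omega)]
    · rw [pvAdjGo, if_neg (by omega)]
      rw [List.drop_eq_nil_of_le (by omega)]
      rfl

lemma pvPrev_eq (slots : List (List (String × String))) (k : Nat) (hk : k < slots.length) :
    adjacentTextSlot slots (k : Int) (-1) = (pvScan slots).getD k "" := by
  unfold adjacentTextSlot
  have harg : (k : Int) + -1 = ((k : Int) - 1) := by ring
  rw [harg, pvAdj_left slots k (slots.length + 1) (by omega) (by omega)]
  have hlen : k < (pvScan slots).length := by
    rw [pvScan_eq, pvScanAux_length]; exact hk
  rw [List.getD_eq_getElem _ _ hlen]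
  have := pvScanAux_getElem slots "" k hk
  simp only [pvScan_eq]
  exact this.symm

lemma pvNext_eq (slots : List (List (String × String))) (k : Nat) (hk : k < slots.length) :
    adjacentTextSlot slots (k : Int) 1 = ((pvScan slots.reverse).reverse).getD k "" := by
  unfold adjacentTextSlot
  have harg : (k : Int) + 1 = ((k + 1 : Nat) : Int) := by omega
  rw [harg, pvAdj_right slots (slots.length + 1) (k + 1) (by omega)]
  have hlenAux : (pvScanAux "" slots.reverse).length = slots.length := by
    rw [pvScanAux_length]; simp
  have hlen : k < ((pvScan slots.reverse).reverse).length := by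
    rw [pvScan_eq]; simpa [hlenAux] using hk
  rw [List.getD_eq_getElem _ _ hlen]
  have hk' : slots.length - 1 - k < (pvScanAux "" slots.reverse).length := by omega
  have hrev : ((pvScan slots.reverse).reverse)[k]'hlen
      = (pvScanAux "" slots.reverse)[slots.length - 1 - k]'hk' := by
    simp only [pvScan_eq]
    rw [List.getElem_reverse]
    congr 1
    omega
  rw [hrev, pvScanAux_getElem slots.reverse "" (slots.length - 1 - k)
        (by simp only [List.length_reverse]; omega)]
  rw [List.take_reverse, List.reverse_reverse]
  have hn : slots.length - (slots.length - 1 - k) = k + 1 := by omega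
  rw [hn]

lemma pvZip_eq_map (slots : List (List (String × String))) :
    slots.zip ((pvScan slots).zip ((pvScan slots.reverse).reverse))
      = (PySem.List.enumerate slots).map
          (fun q => (q.2, ((pvScan slots).getD q.1.toNat "",
                           ((pvScan slots.reverse).reverse).getD q.1.toNat ""))) := by
  have h1 : (pvScan slots).length = slots.length := by rw [pvScan_eq, pvScanAux_length]
  have h2 : ((pvScan slots.reverse).reverse).length = slots.length := by
    rw [pvScan_eq]; simp [pvScanAux_length]
  apply List.ext_getElem
  · simp [List.length_zip, h1, h2, PySem.List.length_enumerate]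
  · intro i hi hi'
    have hislots : i < slots.length := by
      simp [List.length_zip, h1, h2] at hi; omega
    simp only [List.getElem_zip, List.getElem_map, PySem.List.getElem_enumerate]
    have ht : ((0 : Int) + (i : Int)).toNat = i := by omega
    rw [ht, List.getD_eq_getElem _ _ (by omega : i < (pvScan slots).length),
        List.getD_eq_getElem _ _ (by omega : i < ((pvScan slots.reverse).reverse).length)]

-- ===== VERDICT (by name: the statement is the Claim_ definition above) =====
theorem structural_slots_py_spec : Claim_equal_structural_slots_py := by
  intro slots _
  show structural_slots_py slots = structural_slots_py_alt slots
  unfold structural_slots_py structural_slots_py_alt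
  simp only []
  rw [pvZip_eq_map, List.foldl_map]
  refine PySem.List.foldl_congr_mem _ _ _ _ ?_
  intro acc p hp
  rcases (PySem.List.mem_enumerate_iff _ _ _).1 hp with ⟨k, hk, rfl⟩
  have ht : ((0 : Int) + (k : Int)) = (k : Int) := by ring
  simp only [ht]
  rw [pvPrev_eq slots k hk, pvNext_eq slots k hk]
  simp [Int.toNat_natCast]
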